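-- pv_equiv track=rewrite | github.com/squishyjs/daily-solve | Python/firstAndLast.py | solve
-- ===== SOURCE A (Python) =====
-- def rotate_arr_right(arr: list[int], k: int) -> list[int]:
--     k = k % len(arr)
--     return arr[-k:] + arr[:-k]
--
-- def solve(n: int, arr: list[int]) -> int:
--     max_sum: int = 0
--
--     for _ in range(n):
--         summ = arr[0] + arr[-1]
--         if summ > max_sum:
--             max_sum = summ
--
--         # rotate array once
--         arr = rotate_arr_right(arr, 1)
--
--     return max_sum
-- ===== SOURCE B (Python) =====
-- def solve(n: int, arr: list[int]) -> int:
--     # Rotations repeat with period len(arr), and the sum at rotation i is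
--     # arr[-i] + arr[-i-1]; so one pass over min(n, len(arr)) circular
--     # adjacent pairs suffices.
--     best = 0
--     for i in range(min(n, len(arr))):
--         s = arr[-i] + arr[-i - 1]
--         if s > best:
--             best = s
--     return best
-- ===== Notes on version B (the rewrite author's own statement) =====
-- stated objective: faster
-- what changed: Instead of physically rotating the list n times and re-reading its ends, B reads each circular adjacent pair arr[-i]+arr[-i-1] directly in a single pass capped at min(n, len(arr)), since the sums repeat with period len(arr).
import Mathlib
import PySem

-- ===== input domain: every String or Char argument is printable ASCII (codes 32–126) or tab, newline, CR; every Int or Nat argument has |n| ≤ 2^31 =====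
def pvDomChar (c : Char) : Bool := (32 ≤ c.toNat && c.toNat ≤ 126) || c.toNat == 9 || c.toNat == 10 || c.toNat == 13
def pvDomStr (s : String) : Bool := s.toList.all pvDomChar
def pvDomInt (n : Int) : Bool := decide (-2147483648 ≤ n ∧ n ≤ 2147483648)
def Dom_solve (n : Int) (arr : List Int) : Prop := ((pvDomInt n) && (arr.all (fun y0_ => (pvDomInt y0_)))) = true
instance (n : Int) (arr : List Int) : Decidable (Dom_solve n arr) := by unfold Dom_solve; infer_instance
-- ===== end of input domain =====

-- B replaces A's n physical rotations (re-reading the ends each time) by a single pass over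
-- min(n, len(arr)) circular adjacent pair sums arr[-i] + arr[-i-1]: asymptotically faster.

-- ===== PORT A =====
-- helper: rotate_arr_right(arr, k)
def rotateArrRight (arr : List Int) (k : Int) : List Int :=
  let k2 := PySem.Int.mod k (arr.length : Int)
  PySem.List.slice arr (some (-k2)) none ++ PySem.List.slice arr none (some (-k2))

def solve (n : Int) (arr : List Int) : Int :=
  ((PySem.List.pyRange 0 n 1).foldl (fun st _ =>
      let summ := PySem.List.pyGetD st.1 0 0 + PySem.List.pyGetD st.1 (-1) 0
      let best := if summ > st.2 then summ else st.2
      (rotateArrRight st.1 1, best)) (arr, 0)).2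

-- ===== PORT B =====
def solve_alt (n : Int) (arr : List Int) : Int :=
  (PySem.List.pyRange 0 (min n (arr.length : Int)) 1).foldl (fun best i =>
      let s := PySem.List.pyGetD arr (-i) 0 + PySem.List.pyGetD arr (-i - 1) 0
      if s > best then s else best) 0

-- ===== PRECONDITION & SPEC =====
-- Pre_ excludes only the inputs where A raises: arr = [] with n > 0 (IndexError at arr[0]).
def Pre_solve (n : Int) (arr : List Int) : Prop := arr ≠ [] ∨ n ≤ 0
instance (n : Int) (arr : List Int) : Decidable (Pre_solve n arr) := by unfold Pre_solve; infer_instance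
def pvWitness_solve : Int × List Int := (3, [1, 2, 3])

def Spec_solve (n : Int) (arr : List Int) (out : Int) : Prop := out = solve_alt n arr
instance (n : Int) (arr : List Int) (out : Int) : Decidable (Spec_solve n arr out) := by unfold Spec_solve; infer_instance

-- ===== CLAIM (what is proved, stated in full; the proofs are below) =====
def Claim_equal_solve : Prop := ∀ (n : Int) (arr : List Int), Dom_solve n arr → Pre_solve n arr → Spec_solve n arr (solve n arr)

-- ===== LEMMAS AND PROOFS =====

-- A's loop body as a function of the state (the loop variable is ignored)
def stepA (st : List Int × Int) : List Int × Int :=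
  let summ := PySem.List.pyGetD st.1 0 0 + PySem.List.pyGetD st.1 (-1) 0
  let best := if summ > st.2 then summ else st.2
  (rotateArrRight st.1 1, best)

-- first + last of a nonempty list
def sumEnds (l : List Int) : Int := PySem.List.pyGetD l 0 0 + PySem.List.pyGetD l (-1) 0

-- the sum A sees at iteration i (rotating right i times = List.rotate by i*(L-1))
def gsum (arr : List Int) (i : Nat) : Int := sumEnds (arr.rotate (i * (arr.length - 1)))

lemma foldl_ignore {α β : Type} (f : β → β) (l : List α) (init : β) :
    l.foldl (fun st _ => f st) init = f^[l.length] init := by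
  induction l generalizing init with
  | nil => rfl
  | cons x xs ih => simp [List.foldl_cons, ih, Function.iterate_succ_apply]

lemma if_gt_eq_max (a b : Int) : (if a > b then a else b) = max b a := by
  rw [max_def]; split_ifs <;> omega

lemma rotateArrRight_one (l : List Int) (h : l ≠ []) :
    rotateArrRight l 1 = l.rotate (l.length - 1) := by
  have hL : 1 ≤ l.length := List.length_pos_iff.mpr h
  unfold rotateArrRight
  rcases Nat.lt_or_ge 1 l.length with h2 | h1
  · -- length ≥ 2: 1 % L = 1
    have hm : PySem.Int.mod 1 (l.length : Int) = 1 := by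
      have h1L : 1 % l.length = 1 := Nat.mod_eq_of_lt h2
      have := PySem.Int.mod_natCast 1 l.length
      rw [h1L] at this
      exact_mod_cast this
    rw [hm]
    show PySem.List.slice l (some (-1)) none ++ PySem.List.slice l none (some (-1)) =
      l.rotate (l.length - 1)
    rw [PySem.List.slice_from_neg_one, PySem.List.slice_to_neg_one]
    rw [List.rotate_eq_drop_append_take (by omega)]
    rw [List.dropLast_eq_take]
  · -- length = 1: 1 % L = 0, both sides are l
    have hL1 : l.length = 1 := by omega
    have hm : PySem.Int.mod 1 (l.length : Int) = 0 := by
      rw [hL1]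
      have h11 := PySem.Int.mod_natCast 1 1
      simpa using h11
    rw [hm]
    show PySem.List.slice l (some (-0)) none ++ PySem.List.slice l none (some (-0)) =
      l.rotate (l.length - 1)
    rw [neg_zero, hL1]
    simp [PySem.List.slice_to l (by omega : (0:Int) ≤ 0)]

lemma sumEnds_eq (l : List Int) (h : l ≠ []) :
    sumEnds l = l[0]'(List.length_pos_iff.mpr h) +
      l[l.length - 1]'(by have := List.length_pos_iff.mpr h; omega) := by
  have h0 : PySem.List.pyGetD l 0 0 = l[0]'(List.length_pos_iff.mpr h) := by
    have := PySem.List.pyGetD_eq_getElem l (i := 0) 0 (by omega)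
      (by exact_mod_cast List.length_pos_iff.mpr h)
    simpa using this
  have h1 : PySem.List.pyGetD l (-1) 0 = l.getLast h := PySem.List.pyGetD_neg_one l 0 h
  rw [sumEnds, h0, h1, List.getLast_eq_getElem]

lemma iterA (arr : List Int) (h : arr ≠ []) (m : Nat) :
    stepA^[m] (arr, 0) =
      (arr.rotate (m * (arr.length - 1)), ((List.range m).map (gsum arr)).foldl max 0) := by
  induction m with
  | zero => simp
  | succ m ih =>
    rw [Function.iterate_succ_apply', ih]
    have hne : arr.rotate (m * (arr.length - 1)) ≠ [] := by
      simpa [List.rotate_eq_nil_iff] using h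
    show (rotateArrRight (arr.rotate (m * (arr.length - 1))) 1, _) = _
    rw [rotateArrRight_one _ hne]
    simp only [Prod.mk.injEq]
    constructor
    · rw [List.length_rotate, List.rotate_rotate]
      congr 1
      ring
    · show (if sumEnds (arr.rotate (m * (arr.length - 1))) >
            List.foldl max 0 (List.map (gsum arr) (List.range m))
          then sumEnds (arr.rotate (m * (arr.length - 1)))
          else List.foldl max 0 (List.map (gsum arr) (List.range m))) = _
      rw [if_gt_eq_max, List.range_succ, List.map_append, List.foldl_append]
      simp [gsum]

lemma solve_eq (n : Int) (arr : List Int) (h : arr ≠ []) :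
    solve n arr = ((List.range n.toNat).map (gsum arr)).foldl max 0 := by
  unfold solve
  rw [show (fun (st : List Int × Int) (_ : Int) =>
      let summ := PySem.List.pyGetD st.1 0 0 + PySem.List.pyGetD st.1 (-1) 0
      let best := if summ > st.2 then summ else st.2
      (rotateArrRight st.1 1, best)) = (fun st _ => stepA st) from rfl]
  rw [foldl_ignore, PySem.List.length_pyRange_one]
  rw [show ((n : Int) - 0).toNat = n.toNat by omega]
  rw [iterA arr h]

lemma gsum_mod (arr : List Int) (i : Nat) :
    gsum arr i = gsum arr (i % arr.length) := by
  unfold gsum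
  congr 1
  rw [← List.rotate_mod arr (i * (arr.length - 1)),
      ← List.rotate_mod arr (i % arr.length * (arr.length - 1))]
  congr 1
  exact (Nat.ModEq.mul_right (arr.length - 1) (Nat.mod_modEq i arr.length)).symm

lemma mul_pred_mod (k L : Nat) (h1 : 1 ≤ k) (hk : k ≤ L) : (k * (L - 1)) % L = L - k := by
  have e0 : k * (L - 1) = k * L - k * 1 := Nat.mul_sub k L 1
  rw [Nat.mul_one] at e0
  have hkL : k ≤ k * L := Nat.le_mul_of_pos_right k (by omega)
  have e2 : (k - 1) * L = k * L - L := Nat.sub_one_mul k L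
  have hLk : L ≤ k * L := Nat.le_mul_of_pos_left L (by omega)
  have e3 : k * (L - 1) = (L - k) + (k - 1) * L := by omega
  rw [e3, Nat.add_mul_mod_self_right]
  exact Nat.mod_eq_of_lt (by omega)

lemma gsum_eq_pair (arr : List Int) (h : arr ≠ []) (k : Nat) (hk : k < arr.length) :
    gsum arr k = PySem.List.pyGetD arr (-(k : Int)) 0 + PySem.List.pyGetD arr (-(k : Int) - 1) 0 := by
  have hL : 1 ≤ arr.length := List.length_pos_iff.mpr h
  have hne : arr.rotate (k * (arr.length - 1)) ≠ [] := by
    simpa [List.rotate_eq_nil_iff] using h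
  rw [gsum, sumEnds_eq _ hne]
  rcases Nat.eq_zero_or_pos k with hk0 | hk1
  · subst hk0
    simp only [Nat.zero_mul, List.rotate_zero]
    have hfirst : PySem.List.pyGetD arr (-((0 : Nat) : Int)) 0 = arr[0]'(by omega) := by
      have := PySem.List.pyGetD_eq_getElem arr (i := 0) 0 (by omega)
        (by exact_mod_cast List.length_pos_iff.mpr h)
      simpa using this
    have hlast : PySem.List.pyGetD arr (-((0 : Nat) : Int) - 1) 0 = arr.getLast h := by
      have := PySem.List.pyGetD_neg_one arr 0 h
      simpa using this
    rw [hfirst, hlast, List.getLast_eq_getElem]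
  · -- k ≥ 1
    have hfirst : PySem.List.pyGetD arr (-(k : Int)) 0 = arr[arr.length - k]'(by omega) :=
      PySem.List.pyGetD_neg_natCast arr k 0 hk1 hk.le
    have hcast : (-(k : Int) - 1) = -(((k + 1 : Nat)) : Int) := by push_cast; ring
    have hsecond : PySem.List.pyGetD arr (-(k : Int) - 1) 0 =
        arr[arr.length - (k + 1)]'(by omega) := by
      rw [hcast]
      exact PySem.List.pyGetD_neg_natCast arr (k + 1) 0 (Nat.succ_pos k) hk
    rw [hfirst, hsecond]
    have i1 : (0 + k * (arr.length - 1)) % arr.length = arr.length - k := by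
      rw [Nat.zero_add]; exact mul_pred_mod k arr.length hk1 hk.le
    have i2 : ((arr.rotate (k * (arr.length - 1))).length - 1 + k * (arr.length - 1)) %
        arr.length = arr.length - (k + 1) := by
      rw [List.length_rotate]
      have e : arr.length - 1 + k * (arr.length - 1) = (k + 1) * (arr.length - 1) := by
        rw [Nat.succ_mul]; omega
      rw [e]; exact mul_pred_mod (k + 1) arr.length (by omega) (by omega)
    congr 1
    · rw [List.getElem_rotate]; simp only [i1]
    · rw [List.getElem_rotate]; simp only [i2]

lemma foldl_max_le (l : List Int) (a b : Int) (ha : a ≤ b) (h : ∀ x ∈ l, x ≤ b) :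
    l.foldl max a ≤ b := by
  induction l generalizing a with
  | nil => simpa using ha
  | cons x xs ih =>
    rw [List.foldl_cons]
    exact ih (max a x) (max_le ha (h x (by simp))) (fun y hy => h y (by simp [hy]))

lemma foldl_max_eq (l₁ l₂ : List Int) (a : Int) (h₁ : ∀ x ∈ l₁, x ∈ l₂) (h₂ : ∀ x ∈ l₂, x ∈ l₁) :
    l₁.foldl max a = l₂.foldl max a := by
  apply le_antisymm
  · exact foldl_max_le l₁ a _ (PySem.List.le_foldl_max l₂ a).1
      (fun x hx => (PySem.List.le_foldl_max l₂ a).2 x (h₁ x hx))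
  · exact foldl_max_le l₂ a _ (PySem.List.le_foldl_max l₁ a).1
      (fun x hx => (PySem.List.le_foldl_max l₁ a).2 x (h₂ x hx))

lemma solve_alt_eq (n : Int) (arr : List Int) (h : arr ≠ []) :
    solve_alt n arr =
      ((List.range (min n (arr.length : Int)).toNat).map (gsum arr)).foldl max 0 := by
  have hL : 1 ≤ arr.length := List.length_pos_iff.mpr h
  unfold solve_alt
  rw [PySem.List.pyRange_one, List.foldl_map]
  rw [show ((min n ((arr.length : Int))) - 0).toNat = (min n ((arr.length : Int))).toNat by omega]
  refine Eq.trans (PySem.List.foldl_congr_mem _ _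
    (fun (b : Int) (k : Nat) => max b (gsum arr k)) 0 ?_) ?_
  · intro acc k hk
    have hklt : k < arr.length := by
      have h1 := List.mem_range.mp hk
      omega
    simp only [zero_add]
    show (if PySem.List.pyGetD arr (-(k : Int)) 0 + PySem.List.pyGetD arr (-(k : Int) - 1) 0 > acc
      then PySem.List.pyGetD arr (-(k : Int)) 0 + PySem.List.pyGetD arr (-(k : Int) - 1) 0
      else acc) = max acc (gsum arr k)
    rw [← gsum_eq_pair arr h k hklt, if_gt_eq_max]
  · exact List.foldl_map.symm

-- ===== VERDICT (by name: the statement is the Claim_ definition above) =====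
theorem solve_spec : Claim_equal_solve := by
  intro n arr _ hpre
  unfold Spec_solve
  by_cases hn : n ≤ 0
  · -- empty loop on both sides
    have h1 : PySem.List.pyRange 0 n 1 = [] := PySem.List.pyRange_one_eq_nil (by omega)
    have h2 : PySem.List.pyRange 0 (min n (arr.length : Int)) 1 = [] :=
      PySem.List.pyRange_one_eq_nil (by omega)
    unfold solve solve_alt
    rw [h1, h2]
    rfl
  · have h : arr ≠ [] := by
      rcases hpre with h | h
      · exact h
      · omega
    have hL : 1 ≤ arr.length := List.length_pos_iff.mpr h
    have hM : (min n ((arr.length : Int))).toNat = min n.toNat arr.length := by omega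
    rw [solve_eq n arr h, solve_alt_eq n arr h, hM]
    apply foldl_max_eq
    · intro x hx
      rcases List.mem_map.mp hx with ⟨i, hi, rfl⟩
      have hi' : i < n.toNat := List.mem_range.mp hi
      rw [gsum_mod arr i]
      refine List.mem_map.mpr ⟨i % arr.length, List.mem_range.mpr ?_, rfl⟩
      have hm1 := Nat.mod_lt i (show 0 < arr.length by omega)
      have hm2 := Nat.mod_le i arr.length
      omega
    · intro x hx
      rcases List.mem_map.mp hx with ⟨j, hj, rfl⟩
      have hj' : j < min n.toNat arr.length := List.mem_range.mp hj
      exact List.mem_map.mpr ⟨j, List.mem_range.mpr (by omega), rfl⟩
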